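-- pv_equiv track=rewrite | github.com/Env-CLI/envcli | src/envcli/ai_actions.py | _identify_variable_groups
-- ===== SOURCE A (Python) =====
-- from typing import Dict, List, Optional, Any, Tuple
--
-- def _identify_variable_groups(var_names: List[str]) -> Dict[str, List[str]]:
--     """Identify groups of related variables."""
--     groups = {}
--
--     # Common prefixes to look for
--     common_groups = {
--         'database': ['db', 'database', 'postgres', 'mysql', 'mongo'],
--         'api': ['api', 'endpoint', 'url'],
--         'auth': ['auth', 'token', 'key', 'secret', 'password'],
--         'aws': ['aws', 's3', 'ec2', 'lambda'],
--         'redis': ['redis', 'cache'],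
--         'email': ['email', 'smtp', 'mail'],
--     }
--
--     for group_name, keywords in common_groups.items():
--         matching_vars = []
--         for var in var_names:
--             var_lower = var.lower()
--             if any(keyword in var_lower for keyword in keywords):
--                 matching_vars.append(var)
--
--         if matching_vars:
--             groups[group_name] = matching_vars
--
--     return groups
-- ===== SOURCE B (Python) =====
-- from typing import Dict, List
--
-- # Inverted keyword index: keyword -> group name (keywords are unique across groups).
-- _KW2GROUP = {
--     'db': 'database', 'database': 'database', 'postgres': 'database',
--     'mysql': 'database', 'mongo': 'database',
--     'api': 'api', 'endpoint': 'api', 'url': 'api',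
--     'auth': 'auth', 'token': 'auth', 'key': 'auth', 'secret': 'auth', 'password': 'auth',
--     'aws': 'aws', 's3': 'aws', 'ec2': 'aws', 'lambda': 'aws',
--     'redis': 'redis', 'cache': 'redis',
--     'email': 'email', 'smtp': 'email', 'mail': 'email',
-- }
-- _KW_LENS = [2, 3, 4, 5, 6, 8]   # the distinct keyword lengths
-- _GROUP_ORDER = ['database', 'api', 'auth', 'aws', 'redis', 'email']
--
--
-- def _matched_groups(s):
--     """Groups hit by s: enumerate s's substrings of keyword lengths, look them up."""
--     hits = set()
--     for i in range(len(s)):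
--         for L in _KW_LENS:
--             g = _KW2GROUP.get(s[i:i + L])
--             if g is not None:
--                 hits.add(g)
--     return hits
--
--
-- def _identify_variable_groups(var_names: List[str]) -> Dict[str, List[str]]:
--     """Identify groups of related variables (substring enumeration + inverted index)."""
--     tagged = [(var, _matched_groups(var.lower())) for var in var_names]
--     groups = {}
--     for g in _GROUP_ORDER:
--         vs = [var for var, hits in tagged if g in hits]
--         if vs:
--             groups[g] = vs
--     return groups
-- ===== Notes on version B (the rewrite author's own statement) =====
-- stated objective: alternative
-- what changed: Matching is inverted: instead of testing each group's keywords for containment in each name, B enumerates each lowered name's substrings of the keyword lengths and looks them up in a precomputed keyword-to-group hash index, tagging each name once with its set of matched groups before assembling the output in group order.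
import Mathlib
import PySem

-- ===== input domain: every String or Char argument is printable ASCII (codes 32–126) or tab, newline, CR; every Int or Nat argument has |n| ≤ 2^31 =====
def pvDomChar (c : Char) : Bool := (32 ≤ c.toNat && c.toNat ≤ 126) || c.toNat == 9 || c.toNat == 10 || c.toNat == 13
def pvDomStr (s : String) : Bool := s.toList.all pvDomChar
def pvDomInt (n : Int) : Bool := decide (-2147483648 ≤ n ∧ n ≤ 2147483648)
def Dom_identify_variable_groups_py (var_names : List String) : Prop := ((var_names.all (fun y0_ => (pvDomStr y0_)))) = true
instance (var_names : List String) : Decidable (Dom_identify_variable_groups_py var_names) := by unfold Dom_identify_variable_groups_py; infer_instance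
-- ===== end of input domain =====

-- B inverts the matching: it enumerates each lowered name's substrings of the keyword lengths and
-- looks them up in a keyword→group index, instead of testing each group's keywords for containment.

-- ===== PORT A =====
-- the common_groups table of A (insertion order)
def pvGroupsA : List (String × List String) :=
  [("database", ["db", "database", "postgres", "mysql", "mongo"]),
   ("api", ["api", "endpoint", "url"]),
   ("auth", ["auth", "token", "key", "secret", "password"]),
   ("aws", ["aws", "s3", "ec2", "lambda"]),
   ("redis", ["redis", "cache"]),
   ("email", ["email", "smtp", "mail"])]

def identify_variable_groups_py (var_names : List String) : List (String × List String) :=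
  pvGroupsA.foldl (fun groups gk =>
    let matching_vars := var_names.foldl (fun acc var =>
      if gk.2.any (fun keyword => PySem.Str.isIn keyword (PySem.Str.lower var)) then acc ++ [var]
      else acc) []
    if !matching_vars.isEmpty then groups ++ [(gk.1, matching_vars)] else groups) []

-- ===== PORT B =====
-- B's inverted index _KW2GROUP: keyword -> group name
def pvKw2Group : PySem.Dict String String := PySem.Dict.mk
  [("db","database"),("database","database"),("postgres","database"),("mysql","database"),("mongo","database"),
   ("api","api"),("endpoint","api"),("url","api"),
   ("auth","auth"),("token","auth"),("key","auth"),("secret","auth"),("password","auth"),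
   ("aws","aws"),("s3","aws"),("ec2","aws"),("lambda","aws"),
   ("redis","redis"),("cache","redis"),
   ("email","email"),("smtp","email"),("mail","email")]

-- B's _KW_LENS and _GROUP_ORDER
def pvKwLens : List Int := [2, 3, 4, 5, 6, 8]
def pvGroupOrder : List String := ["database", "api", "auth", "aws", "redis", "email"]

-- B's _matched_groups (on the code points of the lowered name; s[i:i+L] is PySem.List.slice)
def matchedGroups (s : List Char) : PySem.Set String :=
  (PySem.List.pyRange 0 (s.length : Int) 1).foldl (fun hits i =>
    pvKwLens.foldl (fun hits L =>
      match pvKw2Group.get? (String.ofList (PySem.List.slice s (some i) (some (i + L)))) with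
      | some g => PySem.Set.add hits g
      | none => hits) hits) PySem.Set.empty

def identify_variable_groups_py_alt (var_names : List String) : List (String × List String) :=
  let tagged := var_names.map (fun var => (var, matchedGroups (PySem.Str.lower var).toList))
  pvGroupOrder.foldl (fun groups g =>
    let vs := (tagged.filter (fun t => PySem.Set.contains t.2 g)).map (fun t => t.1)
    if !vs.isEmpty then groups ++ [(g, vs)] else groups) []

-- ===== PRECONDITION & SPEC =====
def Spec_identify_variable_groups_py (var_names : List String) (out : List (String × List String)) : Prop := out = identify_variable_groups_py_alt var_names
instance (var_names : List String) (out : List (String × List String)) : Decidable (Spec_identify_variable_groups_py var_names out) := by unfold Spec_identify_variable_groups_py; infer_instance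

-- ===== CLAIM =====
def Claim_equal_identify_variable_groups_py : Prop := ∀ (var_names : List String), Dom_identify_variable_groups_py var_names → Spec_identify_variable_groups_py var_names (identify_variable_groups_py var_names)

-- ===== LEMMAS AND PROOFS =====

-- a fold that conditionally appends one transformed element is filter-then-map
theorem pv_foldl_filtmap {α β : Type} (c : α → Bool) (r : α → β) :
    ∀ (gs : List α) (acc : List β),
      gs.foldl (fun out g => if c g then out ++ [r g] else out) acc
        = acc ++ (gs.filter c).map r := by
  intro gs
  induction gs with
  | nil => simp
  | cons g gs ih =>
    intro acc
    simp only [List.foldl_cons, List.filter_cons]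
    by_cases h : c g = true <;> simp [h, ih]

-- membership after B's inner fold over the keyword lengths
theorem pv_inner_mem (s : List Char) (i : Int) (y : String) :
    ∀ (Ls : List Int) (hits : PySem.Set String),
      y ∈ Ls.foldl (fun hits L =>
          match pvKw2Group.get? (String.ofList (PySem.List.slice s (some i) (some (i + L)))) with
          | some g => PySem.Set.add hits g
          | none => hits) hits
        ↔ y ∈ hits ∨ ∃ L ∈ Ls,
            pvKw2Group.get? (String.ofList (PySem.List.slice s (some i) (some (i + L)))) = some y := by
  intro Ls
  induction Ls with
  | nil => simp
  | cons L Ls ih =>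
    intro hits
    simp only [List.foldl_cons]
    cases hget : pvKw2Group.get? (String.ofList (PySem.List.slice s (some i) (some (i + L)))) with
    | some g =>
      rw [ih]
      simp only [PySem.Set.mem_add, List.mem_cons]
      constructor
      · rintro ((h | rfl) | ⟨L', hL', h⟩)
        · exact Or.inl h
        · exact Or.inr ⟨L, Or.inl rfl, hget⟩
        · exact Or.inr ⟨L', Or.inr hL', h⟩
      · rintro (h | ⟨L', (rfl | hL'), h⟩)
        · exact Or.inl (Or.inl h)
        · rw [hget] at h; exact Or.inl (Or.inr (Option.some_injective _ h).symm)
        · exact Or.inr ⟨L', hL', h⟩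
    | none =>
      rw [ih]
      constructor
      · rintro (h | ⟨L', hL', h⟩)
        · exact Or.inl h
        · exact Or.inr ⟨L', List.mem_cons_of_mem _ hL', h⟩
      · rintro (h | ⟨L', hL', h⟩)
        · exact Or.inl h
        · rcases List.mem_cons.mp hL' with rfl | hL''
          · rw [hget] at h; cases h
          · exact Or.inr ⟨L', hL'', h⟩

-- membership after B's outer fold over the start indices
theorem pv_outer_mem (s : List Char) (y : String) :
    ∀ (is_ : List Int) (hits : PySem.Set String),
      y ∈ is_.foldl (fun hits i =>
          pvKwLens.foldl (fun hits L =>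
            match pvKw2Group.get? (String.ofList (PySem.List.slice s (some i) (some (i + L)))) with
            | some g => PySem.Set.add hits g
            | none => hits) hits) hits
        ↔ y ∈ hits ∨ ∃ i ∈ is_, ∃ L ∈ pvKwLens,
            pvKw2Group.get? (String.ofList (PySem.List.slice s (some i) (some (i + L)))) = some y := by
  intro is_
  induction is_ with
  | nil => simp
  | cons i is_ ih =>
    intro hits
    simp only [List.foldl_cons]
    rw [ih, pv_inner_mem]
    constructor
    · rintro ((h | ⟨L, hL, h⟩) | ⟨i', hi', h⟩)
      · exact Or.inl h
      · exact Or.inr ⟨i, List.mem_cons_self .., L, hL, h⟩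
      · exact Or.inr ⟨i', List.mem_cons_of_mem _ hi', h⟩
    · rintro (h | ⟨i', hi', h⟩)
      · exact Or.inl (Or.inl h)
      · rcases List.mem_cons.mp hi' with rfl | hi''
        · exact Or.inl (Or.inr h)
        · exact Or.inr ⟨i', hi'', h⟩

theorem pv_mem_matchedGroups (s : List Char) (y : String) :
    y ∈ matchedGroups s
      ↔ ∃ i ∈ PySem.List.pyRange 0 (s.length : Int) 1, ∃ L ∈ pvKwLens,
          pvKw2Group.get? (String.ofList (PySem.List.slice s (some i) (some (i + L)))) = some y := by
  unfold matchedGroups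
  rw [pv_outer_mem]
  simp [PySem.Set.empty]

-- a keyword of an admissible length occurs as an enumerated slice iff it is an infix
theorem pv_found_iff (s : List Char) (kw : String)
    (hne : kw.toList ≠ []) (hlen : ((kw.toList.length : Int)) ∈ pvKwLens) :
    (∃ i ∈ PySem.List.pyRange 0 (s.length : Int) 1, ∃ L ∈ pvKwLens,
        String.ofList (PySem.List.slice s (some i) (some (i + L))) = kw)
      ↔ kw.toList <:+: s := by
  constructor
  · rintro ⟨i, hi, L, hL, hslice⟩
    rw [PySem.List.mem_pyRange_iff_of_pos (by norm_num)] at hi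
    obtain ⟨hi0, hilt, -⟩ := hi
    have hL0 : (0:Int) ≤ L := by
      simp [pvKwLens] at hL; rcases hL with h|h|h|h|h|h <;> omega
    have : kw.toList = List.take ((i+L).toNat - i.toNat) (List.drop i.toNat s) := by
      rw [← hslice, String.toList_ofList, PySem.List.slice_toNat s hi0 (by omega)]
    rw [this]
    exact ((List.take_prefix _ _).isInfix).trans ((List.drop_suffix _ _).isInfix)
  · rintro ⟨pre, suf, hs⟩
    refine ⟨(pre.length : Int), ?_, (kw.toList.length : Int), hlen, ?_⟩
    · rw [PySem.List.mem_pyRange_iff_of_pos (by norm_num)]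
      refine ⟨by positivity, ?_, by simp⟩
      have : s.length = pre.length + kw.toList.length + suf.length := by
        subst hs; simp; omega
      have hk : 0 < kw.toList.length := List.length_pos_iff.mpr hne
      omega
    · rw [PySem.List.slice_toNat s (by positivity) (by positivity)]
      have h1 : ((pre.length:Int) + (kw.toList.length:Int)).toNat - (pre.length:Int).toNat = kw.toList.length := by omega
      rw [h1, Int.toNat_natCast, ← hs, List.append_assoc, List.drop_left, List.take_left]
      exact String.ofList_toList

-- index lookups hitting a given group are exactly that group's keywords
theorem pv_get_database (t : String) : pvKw2Group.get? t = some "database" ↔ t ∈ ["db","database","postgres","mysql","mongo"] := by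
  rw [PySem.Dict.get?_eq_some_iff_mem_items _ _ _ (by decide)]; simp [pvKw2Group, Prod.ext_iff]
theorem pv_get_api (t : String) : pvKw2Group.get? t = some "api" ↔ t ∈ ["api","endpoint","url"] := by
  rw [PySem.Dict.get?_eq_some_iff_mem_items _ _ _ (by decide)]; simp [pvKw2Group, Prod.ext_iff]
theorem pv_get_auth (t : String) : pvKw2Group.get? t = some "auth" ↔ t ∈ ["auth","token","key","secret","password"] := by
  rw [PySem.Dict.get?_eq_some_iff_mem_items _ _ _ (by decide)]; simp [pvKw2Group, Prod.ext_iff]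
theorem pv_get_aws (t : String) : pvKw2Group.get? t = some "aws" ↔ t ∈ ["aws","s3","ec2","lambda"] := by
  rw [PySem.Dict.get?_eq_some_iff_mem_items _ _ _ (by decide)]; simp [pvKw2Group, Prod.ext_iff]
theorem pv_get_redis (t : String) : pvKw2Group.get? t = some "redis" ↔ t ∈ ["redis","cache"] := by
  rw [PySem.Dict.get?_eq_some_iff_mem_items _ _ _ (by decide)]; simp [pvKw2Group, Prod.ext_iff]
theorem pv_get_email (t : String) : pvKw2Group.get? t = some "email" ↔ t ∈ ["email","smtp","mail"] := by
  rw [PySem.Dict.get?_eq_some_iff_mem_items _ _ _ (by decide)]; simp [pvKw2Group, Prod.ext_iff]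

-- a group's A-side any-keyword test equals B-side membership in matchedGroups
theorem pv_group_eq (g : String) (kws : List String)
    (hmem : ∀ t, pvKw2Group.get? t = some g ↔ t ∈ kws)
    (hkws : ∀ kw ∈ kws, kw.toList ≠ [] ∧ ((kw.toList.length : Int) ∈ pvKwLens))
    (v : String) :
    kws.any (fun keyword => PySem.Str.isIn keyword (PySem.Str.lower v))
      = PySem.Set.contains (matchedGroups (PySem.Str.lower v).toList) g := by
  rw [Bool.eq_iff_iff]
  simp only [List.any_eq_true, PySem.Str.isIn_eq, PySem.Chars.isIn_iff_infix,
             PySem.Set.contains_iff, pv_mem_matchedGroups]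
  constructor
  · rintro ⟨kw, hkw, hinf⟩
    obtain ⟨hne, hlen⟩ := hkws kw hkw
    obtain ⟨i, hi, L, hL, hsl⟩ := (pv_found_iff _ kw hne hlen).mpr hinf
    exact ⟨i, hi, L, hL, (hmem _).mpr (hsl ▸ hkw)⟩
  · rintro ⟨i, hi, L, hL, hget⟩
    have hk := (hmem _).mp hget
    obtain ⟨hne, hlen⟩ := hkws _ hk
    exact ⟨_, hk, (pv_found_iff _ _ hne hlen).mp ⟨i, hi, L, hL, rfl⟩⟩

-- filtering the keyed table and filtering the key list agree
theorem pv_reindex {p : String → Bool} {w : String → List String} :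
    (pvGroupsA.filter (fun gk => p gk.1)).map (fun gk => (gk.1, w gk.1))
      = (pvGroupOrder.filter p).map (fun g => (g, w g)) := by
  simp only [pvGroupsA, pvGroupOrder, List.filter_cons, List.filter_nil]
  split_ifs <;> rfl

-- ===== VERDICT =====
theorem identify_variable_groups_py_spec : Claim_equal_identify_variable_groups_py := by
  intro var_names _
  show identify_variable_groups_py var_names = identify_variable_groups_py_alt var_names
  simp only [identify_variable_groups_py, identify_variable_groups_py_alt]
  simp only [pv_foldl_filtmap, List.nil_append]
  -- B side: collapse tagged filtering to a plain filter of var_names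
  simp only [List.filter_map, List.map_map, Function.comp_def, List.map_id']
  -- A side: replace each group's keyword test by B's matchedGroups membership
  have hgk : ∀ gk ∈ pvGroupsA,
      var_names.filter (fun var => gk.2.any (fun keyword => PySem.Str.isIn keyword (PySem.Str.lower var)))
        = var_names.filter (fun var => PySem.Set.contains (matchedGroups (PySem.Str.lower var).toList) gk.1) := by
    intro gk hgkmem
    apply List.filter_congr
    intro v _
    simp only [pvGroupsA, List.mem_cons, List.not_mem_nil, or_false] at hgkmem
    rcases hgkmem with rfl | rfl | rfl | rfl | rfl | rfl
    · exact pv_group_eq _ _ pv_get_database (by decide) v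
    · exact pv_group_eq _ _ pv_get_api (by decide) v
    · exact pv_group_eq _ _ pv_get_auth (by decide) v
    · exact pv_group_eq _ _ pv_get_aws (by decide) v
    · exact pv_group_eq _ _ pv_get_redis (by decide) v
    · exact pv_group_eq _ _ pv_get_email (by decide) v
  have hpred : ∀ gk ∈ pvGroupsA,
      (!(var_names.filter (fun var => gk.2.any (fun keyword => PySem.Str.isIn keyword (PySem.Str.lower var)))).isEmpty)
        = (!(var_names.filter (fun var => PySem.Set.contains (matchedGroups (PySem.Str.lower var).toList) gk.1)).isEmpty) := by
    intro gk h; rw [hgk gk h]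
  rw [List.filter_congr hpred]
  rw [List.map_congr_left (f := fun gk : String × List String =>
        (gk.1, var_names.filter (fun var => gk.2.any (fun keyword => PySem.Str.isIn keyword (PySem.Str.lower var)))))
      (g := fun gk : String × List String =>
        (gk.1, var_names.filter (fun var => PySem.Set.contains (matchedGroups (PySem.Str.lower var).toList) gk.1)))
      (fun gk h => by simp only [hgk gk (List.mem_of_mem_filter h)])]
  exact pv_reindex
    (p := fun g => !(var_names.filter (fun var => PySem.Set.contains (matchedGroups (PySem.Str.lower var).toList) g)).isEmpty)
    (w := fun g => var_names.filter (fun var => PySem.Set.contains (matchedGroups (PySem.Str.lower var).toList) g))
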